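-- pv_equiv track=rewrite | github.com/krishmittal99/python-git | worksheet3/3.11.py | is_goal_reached
-- ===== SOURCE A (Python) =====
-- def is_goal_reached(path):
--     x, y = 0, 0
--     for move in path:
--         if move == "up":
--             y += 1
--         elif move == "down":
--             y -= 1
--         elif move == "left":
--             x -= 1
--         elif move == "right":
--             x += 1
--     return (x, y) == (2, 0)
-- ===== SOURCE B (Python) =====
-- def is_goal_reached(path):
--     DELTA = {"up": (0, 1), "down": (0, -1), "left": (-1, 0), "right": (1, 0)}
--
--     def disp(seg):
--         # net displacement of a segment, by divide and conquer (displacement is additive)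
--         if len(seg) <= 1:
--             return DELTA.get(seg[0], (0, 0)) if seg else (0, 0)
--         mid = len(seg) // 2
--         x1, y1 = disp(seg[:mid])
--         x2, y2 = disp(seg[mid:])
--         return (x1 + x2, y1 + y2)
--
--     return disp(list(path)) == (2, 0)
-- ===== Notes on version B (the rewrite author's own statement) =====
-- stated objective: alternative
-- what changed: Replaces A's linear branching fold over an (x,y) state with a table-driven divide-and-conquer: the path is split in half recursively, each half's displacement is computed independently and the two vectors are added, exploiting additivity of displacement.
import Mathlib
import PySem

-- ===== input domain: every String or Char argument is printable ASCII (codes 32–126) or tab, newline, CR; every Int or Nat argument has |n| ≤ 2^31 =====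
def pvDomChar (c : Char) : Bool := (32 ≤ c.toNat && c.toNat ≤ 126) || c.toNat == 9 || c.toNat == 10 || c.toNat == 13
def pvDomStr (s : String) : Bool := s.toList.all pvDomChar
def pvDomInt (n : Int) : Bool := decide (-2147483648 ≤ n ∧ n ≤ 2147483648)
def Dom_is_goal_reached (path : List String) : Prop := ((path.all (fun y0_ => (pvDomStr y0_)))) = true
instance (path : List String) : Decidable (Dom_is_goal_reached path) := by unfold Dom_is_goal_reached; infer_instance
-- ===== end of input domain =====

-- B computes the displacement by table-driven divide-and-conquer (split, recurse, add vectors) instead of A's linear branching fold (objective: alternative).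


-- ===== PORT A =====
def is_goal_reached (path : List String) : Bool :=
  let p := path.foldl (fun (s : Int × Int) move =>
    if move = "up" then (s.1, s.2 + 1)
    else if move = "down" then (s.1, s.2 - 1)
    else if move = "left" then (s.1 - 1, s.2)
    else if move = "right" then (s.1 + 1, s.2)
    else s) (0, 0)
  decide (p = (2, 0))

-- ===== PORT B =====
def pvDELTA : PySem.Dict String (Int × Int) :=
  PySem.Dict.ofList [("up", (0, 1)), ("down", (0, -1)), ("left", (-1, 0)), ("right", (1, 0))]

def pvDisp (seg : List String) : Int × Int :=
  if seg.length ≤ 1 then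
    match seg with
    | [] => (0, 0)
    | m :: _ => pvDELTA.getD m (0, 0)
  else
    let mid := seg.length / 2
    let p := pvDisp (seg.take mid)
    let q := pvDisp (seg.drop mid)
    (p.1 + q.1, p.2 + q.2)
termination_by seg.length
decreasing_by
  · simp only [List.length_take]; omega
  · simp only [List.length_drop]; omega

def is_goal_reached_alt (path : List String) : Bool :=
  decide (pvDisp path = ((2 : Int), (0 : Int)))

-- ===== PRECONDITION & SPEC =====
def Spec_is_goal_reached (path : List String) (out : Bool) : Prop := out = is_goal_reached_alt path
instance (path : List String) (out : Bool) : Decidable (Spec_is_goal_reached path out) := by unfold Spec_is_goal_reached; infer_instance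

-- ===== CLAIM (what is proved, stated in full; the proofs are below) =====
def Claim_equal_is_goal_reached : Prop := ∀ (path : List String), Dom_is_goal_reached path → Spec_is_goal_reached path (is_goal_reached path)

-- ===== LEMMAS AND PROOFS =====

theorem fold_counts (path : List String) (x y : Int) :
    path.foldl (fun (s : Int × Int) move =>
      if move = "up" then (s.1, s.2 + 1)
      else if move = "down" then (s.1, s.2 - 1)
      else if move = "left" then (s.1 - 1, s.2)
      else if move = "right" then (s.1 + 1, s.2)
      else s) (x, y)
    = (x + path.count "right" - path.count "left",
       y + path.count "up" - path.count "down") := by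
  induction path generalizing x y with
  | nil => simp
  | cons m ms ih =>
    simp only [List.foldl_cons]
    by_cases h1 : m = "up" <;> by_cases h2 : m = "down" <;> by_cases h3 : m = "left" <;>
      by_cases h4 : m = "right" <;>
      simp_all <;> omega

theorem disp_counts (seg : List String) :
    pvDisp seg
    = ((seg.count "right" : Int) - seg.count "left",
       (seg.count "up" : Int) - seg.count "down") := by
  fun_induction pvDisp seg with
  | case1 h =>
    simp
  | case2 m rest h =>
    have : rest = [] := by
      cases rest with
      | nil => rfl
      | cons a t => simp at h
    subst this
    by_cases h1 : m = "up"
    · subst h1; decide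
    by_cases h2 : m = "down"
    · subst h2; decide
    by_cases h3 : m = "left"
    · subst h3; decide
    by_cases h4 : m = "right"
    · subst h4; decide
    have e1 : ("up" == m) = false := by simp [Ne.symm h1]
    have e2 : ("down" == m) = false := by simp [Ne.symm h2]
    have e3 : ("left" == m) = false := by simp [Ne.symm h3]
    have e4 : ("right" == m) = false := by simp [Ne.symm h4]
    simp [pvDELTA, PySem.Dict.ofList, PySem.Dict.update, PySem.Dict.empty, PySem.Dict.insert,
      PySem.Dict.getD, PySem.Dict.get?, List.find?, e1, e2, e3, e4,
      h1, h2, h3, h4]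
  | case3 seg h mid p q ih1 ih2 =>
    have hcat : seg.take mid ++ seg.drop mid = seg := List.take_append_drop mid seg
    have hr := congrArg (fun l => (l.count "right" : Int)) hcat
    have hl := congrArg (fun l => (l.count "left" : Int)) hcat
    have hu := congrArg (fun l => (l.count "up" : Int)) hcat
    have hd := congrArg (fun l => (l.count "down" : Int)) hcat
    simp only [List.count_append, Nat.cast_add] at hr hl hu hd
    simp only [p, q, ih1, ih2]
    refine Prod.ext ?_ ?_ <;> simp <;> omega

-- ===== VERDICT (by name: the statement is the Claim_ definition above) =====
theorem is_goal_reached_spec : Claim_equal_is_goal_reached := by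
  intro path _
  unfold Spec_is_goal_reached is_goal_reached is_goal_reached_alt
  simp only [fold_counts, disp_counts, zero_add]
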